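-- pv_equiv track=rewrite | github.com/SilkeDainese/my-arxiv-digest | digest.py | _parse_feedback_issue
-- ===== SOURCE A (Python) =====
-- from typing import Any
--
-- def _parse_feedback_issue(issue: dict[str, Any]) -> tuple[str | None, list[str]]:
--     """Extract (feedback_type, matched_keywords) from an issue body."""
--     body = issue.get("body") or ""
--     lines = [line.strip() for line in body.splitlines() if line.strip()]
--
--     feedback_type = None
--     keywords: list[str] = []
--     for line in lines:
--         low = line.lower()
--         if low.startswith("feedback_type:"):
--             feedback_type = line.split(":", 1)[1].strip().lower().replace("-", "_")
--         elif low.startswith("matched_keywords:"):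
--             raw = line.split(":", 1)[1].strip()
--             keywords = [kw.strip() for kw in raw.split(",") if kw.strip()]
--
--     if feedback_type not in {"relevant", "not_relevant", "not relevant"}:
--         return None, []
--     if feedback_type == "not relevant":
--         feedback_type = "not_relevant"
--     return feedback_type, keywords
-- ===== SOURCE B (Python) =====
-- def _parse_feedback_issue(issue):
--     """Extract (feedback_type, matched_keywords) from an issue body."""
--     body = issue.get("body") or ""
--     lines = [line.strip() for line in body.splitlines() if line.strip()]
--
--     # Index every "key: value" line once (last occurrence wins), then look up.
--     table = {}
--     for line in lines:
--         if ":" in line: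
--             key, value = line.split(":", 1)
--             table[key.lower()] = value.strip()
--
--     feedback_type = table.get("feedback_type")
--     if feedback_type is not None:
--         feedback_type = feedback_type.lower().replace("-", "_")
--
--     if feedback_type not in {"relevant", "not_relevant", "not relevant"}:
--         return None, []
--     if feedback_type == "not relevant":
--         feedback_type = "not_relevant"
--
--     raw = table.get("matched_keywords", "")
--     return feedback_type, [kw.strip() for kw in raw.split(",") if kw.strip()]
-- ===== Notes on version B (the rewrite author's own statement) =====
-- stated objective: simpler
-- what changed: B replaces A's in-loop two-branch prefix dispatch by one generic pass that indexes every 'key: value' line into a dict (lowercased first-colon key, last wins) and then reads feedback_type and matched_keywords by two lookups after the loop.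
import Mathlib
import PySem

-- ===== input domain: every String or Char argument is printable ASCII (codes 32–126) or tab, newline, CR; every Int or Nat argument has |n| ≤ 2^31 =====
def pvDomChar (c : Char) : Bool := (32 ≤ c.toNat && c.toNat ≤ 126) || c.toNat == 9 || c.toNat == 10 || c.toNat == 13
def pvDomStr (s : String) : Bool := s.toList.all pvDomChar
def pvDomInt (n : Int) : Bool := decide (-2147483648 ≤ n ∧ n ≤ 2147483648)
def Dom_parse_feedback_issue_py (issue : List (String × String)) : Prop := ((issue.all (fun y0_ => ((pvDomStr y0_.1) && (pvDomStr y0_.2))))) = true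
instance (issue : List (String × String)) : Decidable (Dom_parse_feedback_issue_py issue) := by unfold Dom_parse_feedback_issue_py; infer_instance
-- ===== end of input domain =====

-- B replaces A's in-loop two-branch dispatch by a generic "key: value" index built in one pass
-- plus two lookups afterwards (objective: simpler/idiomatic; same asymptotic cost).

-- ===== PORT A =====

-- body = issue.get("body") or ""  (empty string is falsy)
def pvBody (issue : List (String × String)) : String :=
  match (PySem.Dict.mk issue).get? "body" with
  | none => ""
  | some s => if s.toList.isEmpty then "" else s

-- lines = [line.strip() for line in body.splitlines() if line.strip()]
def pvLines (issue : List (String × String)) : List String :=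
  (((PySem.Str.splitlines (pvBody issue)).map PySem.Str.strip).filter (fun l => !l.toList.isEmpty))

-- line.split(":", 1)[1]  — only evaluated under a guard that guarantees a ':' is present,
-- so index 1 exists; getD is the total form of that in-range index.
def pvAfterColon (line : String) : String :=
  ((PySem.Str.splitMax? line ":" 1).getD []).getD 1 ""

-- [kw.strip() for kw in raw.split(",") if kw.strip()]
def pvKw (raw : String) : List String :=
  (((PySem.Str.split? raw ",").getD []).map PySem.Str.strip).filter (fun k => !k.toList.isEmpty)

-- the body of A's for-loop
def pvStepA (st : Option String × List String) (line : String) : Option String × List String :=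
  let low := PySem.Str.lower line
  if PySem.Str.startswith low "feedback_type:" then
    (some (PySem.Str.replace (PySem.Str.lower (PySem.Str.strip (pvAfterColon line))) "-" "_"), st.2)
  else if PySem.Str.startswith low "matched_keywords:" then
    (st.1, pvKw (PySem.Str.strip (pvAfterColon line)))
  else st

def parse_feedback_issue_py (issue : List (String × String)) : Option String × List String :=
  let res := (pvLines issue).foldl pvStepA (none, [])
  if res.1 = some "relevant" ∨ res.1 = some "not_relevant" ∨ res.1 = some "not relevant" then
    (if res.1 = some "not relevant" then some "not_relevant" else res.1, res.2)
  else (none, [])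

-- ===== PORT B =====

-- the body of B's indexing loop: if ":" in line: key, value = line.split(":", 1); table[key.lower()] = value.strip()
def pvStepB (t : PySem.Dict String String) (line : String) : PySem.Dict String String :=
  if PySem.Str.isIn ":" line then
    let parts := (PySem.Str.splitMax? line ":" 1).getD []
    t.insert (PySem.Str.lower (parts.getD 0 "")) (PySem.Str.strip (parts.getD 1 ""))
  else t

def parse_feedback_issue_py_alt (issue : List (String × String)) : Option String × List String :=
  let table := (pvLines issue).foldl pvStepB PySem.Dict.empty
  let ft := (table.get? "feedback_type").map (fun v => PySem.Str.replace (PySem.Str.lower v) "-" "_")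
  if ft = some "relevant" ∨ ft = some "not_relevant" ∨ ft = some "not relevant" then
    (if ft = some "not relevant" then some "not_relevant" else ft,
     pvKw (table.getD "matched_keywords" ""))
  else (none, [])

-- ===== PRECONDITION & SPEC =====
def Spec_parse_feedback_issue_py (issue : List (String × String)) (out : Option String × List String) : Prop := out = parse_feedback_issue_py_alt issue
instance (issue : List (String × String)) (out : Option String × List String) : Decidable (Spec_parse_feedback_issue_py issue out) := by unfold Spec_parse_feedback_issue_py; infer_instance

-- ===== CLAIM (what is proved, stated in full; the proofs are below) =====
def Claim_equal_parse_feedback_issue_py : Prop := ∀ (issue : List (String × String)), Dom_parse_feedback_issue_py issue → Spec_parse_feedback_issue_py issue (parse_feedback_issue_py issue)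

-- ===== LEMMAS AND PROOFS =====

theorem lowerChar_eq_colon_iff (c : Char) : PySem.Chars.lowerChar c = ':' ↔ c = ':' := by
  unfold PySem.Chars.lowerChar PySem.Chars.isupper
  split_ifs with h
  · simp only [decide_eq_true_eq, Bool.and_eq_true] at h
    have h1 : ('A' : Char).toNat ≤ c.toNat := Fin.mk_le_mk.mp h.1
    have h2 : c.toNat ≤ ('Z' : Char).toNat := Fin.mk_le_mk.mp h.2
    have hA : ('A' : Char).toNat = 65 := by decide
    have hZ : ('Z' : Char).toNat = 90 := by decide
    constructor
    · intro he
      exfalso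
      have ht : (Char.ofNat (c.toNat + 32)).toNat = (':' : Char).toNat := by rw [he]
      rw [Char.toNat_ofNat] at ht
      have hv : (c.toNat + 32).isValidChar := by left; omega
      rw [if_pos hv] at ht
      have : (':' : Char).toNat = 58 := by decide
      omega
    · intro he; subst he; exact absurd h (by decide)
  · exact Iff.rfl

theorem colon_eq_lowerChar_iff (c : Char) : (':' = PySem.Chars.lowerChar c) ↔ c = ':' :=
  eq_comm.trans (lowerChar_eq_colon_iff c)

-- lower cs starts with "k:" (no ':' in k)  ⟺  cs has a ':' and the lowered text before the first ':' is k
theorem prefix_colon (k : List Char) (hk : ':' ∉ k) (cs : List Char) :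
    (k ++ [':']) <+: cs.map PySem.Chars.lowerChar ↔
      (':' ∈ cs ∧ (cs.takeWhile (· ≠ ':')).map PySem.Chars.lowerChar = k) := by
  induction k generalizing cs with
  | nil =>
    cases cs with
    | nil => simp
    | cons c t =>
      by_cases hc : c = ':'
      · subst hc
        simp [List.cons_prefix_cons, colon_eq_lowerChar_iff]
      · simp [List.cons_prefix_cons, colon_eq_lowerChar_iff, hc]
  | cons a k ih =>
    have ha : a ≠ ':' := fun h => hk (h ▸ List.mem_cons_self ..)
    have hk' : ':' ∉ k := fun h => hk (List.mem_cons_of_mem _ h)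
    cases cs with
    | nil => simp
    | cons c t =>
      by_cases hc : c = ':'
      · subst hc
        constructor
        · intro h
          rw [List.map_cons, List.cons_append, List.cons_prefix_cons] at h
          exact absurd (h.1.trans (by decide)) ha
        · intro ⟨_, h2⟩
          simp at h2
      · rw [List.map_cons, List.cons_append, List.cons_prefix_cons,
            List.takeWhile_cons_of_pos (by simp [hc]), List.map_cons]
        constructor
        · intro ⟨h1, h2⟩
          have := (ih hk' t).mp h2
          exact ⟨List.mem_cons_of_mem _ this.1, by rw [← h1, this.2]⟩
        · intro ⟨h1, h2⟩
          have hmem : ':' ∈ t := by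
            cases List.mem_cons.mp h1 with
            | inl h => exact absurd h.symm hc
            | inr h => exact h
          injection h2 with h2a h2b
          exact ⟨h2a.symm, (ih hk' t).mpr ⟨hmem, h2b⟩⟩

theorem go_zero (fuel : ℕ) (l cur : List Char) (acc : List (List Char)) (h : 0 < fuel) :
    PySem.Chars.splitOnMax.go [':'] fuel 0 l cur acc = acc.reverse ++ [cur.reverse ++ l] := by
  cases fuel with
  | zero => omega
  | succ n =>
    cases l with
    | nil => simp [PySem.Chars.splitOnMax.go]
    | cons c t => simp [PySem.Chars.splitOnMax.go]

theorem go_one (fuel : ℕ) (l cur : List Char) (acc : List (List Char)) (h : l.length < fuel) :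
    PySem.Chars.splitOnMax.go [':'] fuel 1 l cur acc =
      if ':' ∈ l then acc.reverse ++ [cur.reverse ++ l.takeWhile (· ≠ ':'), (l.dropWhile (· ≠ ':')).tail]
      else acc.reverse ++ [cur.reverse ++ l] := by
  induction fuel generalizing l cur acc with
  | zero => omega
  | succ n ih =>
    cases l with
    | nil => simp [PySem.Chars.splitOnMax.go]
    | cons c t =>
      by_cases hc : c = ':'
      · subst hc
        rw [PySem.Chars.splitOnMax.go]
        simp only [if_neg (by omega : ¬(1:ℕ) = 0)]
        rw [if_pos (by simp [List.isPrefixOf])]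
        rw [show (1:ℕ) - 1 = 0 from rfl, show List.drop [':'].length (':' :: t) = t from rfl]
        rw [go_zero n t [] _ (by simp at h; omega)]
        simp
      · rw [PySem.Chars.splitOnMax.go]
        simp only [if_neg (by omega : ¬(1:ℕ) = 0)]
        rw [if_neg (by simp [List.isPrefixOf]; exact fun h => hc h.symm)]
        rw [ih t (c :: cur) acc (by simp at h ⊢; omega)]
        by_cases hm : ':' ∈ t
        · simp [hm, hc, Ne.symm hc]
        · simp [hm, Ne.symm hc]

theorem splitColon1 (cs : List Char) :
    PySem.Chars.splitOnMax cs [':'] 1 =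
      if ':' ∈ cs then [cs.takeWhile (· ≠ ':'), (cs.dropWhile (· ≠ ':')).tail] else [cs] := by
  rw [PySem.Chars.splitOnMax, if_neg (by omega), Int.toNat_one,
    go_one (cs.length + 1) cs [] [] (by omega)]
  split_ifs <;> simp

-- the loop invariant relating A's state to B's table
def pvR (st : Option String × List String) (t : PySem.Dict String String) : Prop :=
  st.1 = (t.get? "feedback_type").map (fun v => PySem.Str.replace (PySem.Str.lower v) "-" "_") ∧
  st.2 = pvKw (t.getD "matched_keywords" "")

theorem pvR_step (st : Option String × List String) (t : PySem.Dict String String) (line : String)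
    (h : pvR st t) : pvR (pvStepA st line) (pvStepB t line) := by
  have hft : ':' ∉ "feedback_type".toList := by decide
  have hmk : ':' ∉ "matched_keywords".toList := by decide
  have e_ft : PySem.Str.startswith (PySem.Str.lower line) "feedback_type:" = true ↔
      (':' ∈ line.toList ∧ (line.toList.takeWhile (· ≠ ':')).map PySem.Chars.lowerChar = "feedback_type".toList) := by
    rw [PySem.Str.startswith, PySem.Chars.startswith, List.isPrefixOf_iff_prefix]
    rw [show (PySem.Str.lower line).toList = line.toList.map PySem.Chars.lowerChar from by
      simp [PySem.Str.lower, PySem.Chars.lower]]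
    rw [show ("feedback_type:".toList) = ("feedback_type".toList ++ [':']) from by decide]
    exact prefix_colon _ hft _
  have e_mk : PySem.Str.startswith (PySem.Str.lower line) "matched_keywords:" = true ↔
      (':' ∈ line.toList ∧ (line.toList.takeWhile (· ≠ ':')).map PySem.Chars.lowerChar = "matched_keywords".toList) := by
    rw [PySem.Str.startswith, PySem.Chars.startswith, List.isPrefixOf_iff_prefix]
    rw [show (PySem.Str.lower line).toList = line.toList.map PySem.Chars.lowerChar from by
      simp [PySem.Str.lower, PySem.Chars.lower]]
    rw [show ("matched_keywords:".toList) = ("matched_keywords".toList ++ [':']) from by decide]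
    exact prefix_colon _ hmk _
  have e_in : PySem.Str.isIn ":" line = true ↔ ':' ∈ line.toList := by
    rw [PySem.Str.isIn_iff_infix]
    constructor
    · intro hinf
      exact hinf.subset (by decide)
    · intro hm
      obtain ⟨l₁, l₂, hl⟩ := List.append_of_mem hm
      exact ⟨l₁, l₂, by rw [hl]; simp⟩
  have hparts : (PySem.Str.splitMax? line ":" 1).getD [] =
      (PySem.Chars.splitOnMax line.toList [':'] 1).map String.ofList := by
    simp [PySem.Str.splitMax?, PySem.Chars.splitMax?]
  by_cases hcol : ':' ∈ line.toList
  · -- a colon is present: B inserts; which branch A takes depends on the lowered key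
    have hsplit := splitColon1 line.toList
    rw [if_pos hcol] at hsplit
    set before := line.toList.takeWhile (· ≠ ':') with hb
    set after := (line.toList.dropWhile (· ≠ ':')).tail with ha
    have hget0 : ((PySem.Str.splitMax? line ":" 1).getD []).getD 0 "" = String.ofList before := by
      rw [hparts, hsplit]; rfl
    have hkey : PySem.Str.lower (((PySem.Str.splitMax? line ":" 1).getD []).getD 0 "") =
        String.ofList (before.map PySem.Chars.lowerChar) := by
      rw [hget0]; simp [PySem.Str.lower, PySem.Chars.lower]
    by_cases h1 : before.map PySem.Chars.lowerChar = "feedback_type".toList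
    · -- feedback_type line
      have g1 : PySem.Str.startswith (PySem.Str.lower line) "feedback_type:" = true := e_ft.mpr ⟨hcol, h1⟩
      have hkeyft : PySem.Str.lower (((PySem.Str.splitMax? line ":" 1).getD []).getD 0 "") = "feedback_type" := by
        rw [hkey, h1]; rfl
      constructor
      · simp only [pvStepA, pvStepB, g1, if_true, e_in.mpr hcol]
        rw [hkeyft, PySem.Dict.get?_insert_self]
        simp [pvAfterColon]
      · simp only [pvStepA, pvStepB, g1, if_true, e_in.mpr hcol]
        rw [hkeyft, PySem.Dict.getD_insert, if_neg (by decide)]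
        exact h.2
    · by_cases h2 : before.map PySem.Chars.lowerChar = "matched_keywords".toList
      · -- matched_keywords line
        have g1 : PySem.Str.startswith (PySem.Str.lower line) "feedback_type:" = false := by
          rw [Bool.eq_false_iff]; intro hx; exact h1 (e_ft.mp hx).2
        have g2 : PySem.Str.startswith (PySem.Str.lower line) "matched_keywords:" = true := e_mk.mpr ⟨hcol, h2⟩
        have hkeymk : PySem.Str.lower (((PySem.Str.splitMax? line ":" 1).getD []).getD 0 "") = "matched_keywords" := by
          rw [hkey, h2]; rfl
        constructor
        · simp only [pvStepA, pvStepB, g1, g2, Bool.false_eq_true, if_false, if_true, e_in.mpr hcol]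
          rw [hkeymk, PySem.Dict.get?_insert, if_neg (by decide)]
          exact h.1
        · simp only [pvStepA, pvStepB, g1, g2, Bool.false_eq_true, if_false, if_true, e_in.mpr hcol]
          rw [hkeymk, PySem.Dict.getD_insert_self]
          simp [pvAfterColon]
      · -- some other "key: value" line: B inserts an unrelated key, A ignores it
        have g1 : PySem.Str.startswith (PySem.Str.lower line) "feedback_type:" = false := by
          rw [Bool.eq_false_iff]; intro hx; exact h1 (e_ft.mp hx).2
        have g2 : PySem.Str.startswith (PySem.Str.lower line) "matched_keywords:" = false := by
          rw [Bool.eq_false_iff]; intro hx; exact h2 (e_mk.mp hx).2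
        have hk1 : PySem.Str.lower (((PySem.Str.splitMax? line ":" 1).getD []).getD 0 "") ≠ "feedback_type" := by
          rw [hkey]; intro hx
          exact h1 (by rw [← congrArg String.toList hx]; simp)
        have hk2 : PySem.Str.lower (((PySem.Str.splitMax? line ":" 1).getD []).getD 0 "") ≠ "matched_keywords" := by
          rw [hkey]; intro hx
          exact h2 (by rw [← congrArg String.toList hx]; simp)
        constructor
        · simp only [pvStepA, pvStepB, g1, g2, Bool.false_eq_true, if_false, e_in.mpr hcol, if_true]
          rw [PySem.Dict.get?_insert, if_neg (fun hx => hk1 hx.symm)]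
          exact h.1
        · simp only [pvStepA, pvStepB, g1, g2, Bool.false_eq_true, if_false, e_in.mpr hcol, if_true]
          rw [PySem.Dict.getD_insert, if_neg (fun hx => hk2 hx.symm)]
          exact h.2
  · -- no colon: both steps are the identity
    have g1 : PySem.Str.startswith (PySem.Str.lower line) "feedback_type:" = false := by
      rw [Bool.eq_false_iff]; intro hx; exact hcol (e_ft.mp hx).1
    have g2 : PySem.Str.startswith (PySem.Str.lower line) "matched_keywords:" = false := by
      rw [Bool.eq_false_iff]; intro hx; exact hcol (e_mk.mp hx).1
    have g3 : PySem.Str.isIn ":" line = false := by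
      rw [Bool.eq_false_iff]; intro hx; exact hcol (e_in.mp hx)
    simpa only [pvStepA, pvStepB, g1, g2, g3, Bool.false_eq_true, if_false] using h

theorem pvR_foldl (ls : List String) (st : Option String × List String) (t : PySem.Dict String String)
    (h : pvR st t) : pvR (ls.foldl pvStepA st) (ls.foldl pvStepB t) := by
  induction ls generalizing st t with
  | nil => exact h
  | cons l ls ih => exact ih _ _ (pvR_step _ _ _ h)

-- ===== VERDICT (by name: the statement is the Claim_ definition above) =====
theorem parse_feedback_issue_py_spec : Claim_equal_parse_feedback_issue_py := by
  intro issue _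
  unfold Spec_parse_feedback_issue_py parse_feedback_issue_py parse_feedback_issue_py_alt
  have h := pvR_foldl (pvLines issue) (none, []) PySem.Dict.empty (by constructor <;> decide)
  obtain ⟨h1, h2⟩ := h
  simp only [h1, h2]
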